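-- pv_equiv track=rewrite | github.com/dfalbel/raghilda | src/raghilda/read.py | _maybe_expand_outer_code_fence
-- ===== SOURCE A (Python) =====
-- def _maybe_expand_outer_code_fence(text):
--     # take a 'pre' string like this:
--     #     ```
--     #     ```{r}
--     #     foo
--     #     ```
--     #     ```
--     # and converts it to this:
--     #     ````
--     #     ```{r}
--     #     foo
--     #     ```
--     #     ````
--     if text.count("```") > 2:
--         new_fence = ""
--         for n in range(4, 25):
--             new_fence = "`" * n
--             if new_fence not in text:
--                 break
--         old_fence = "```"
--         old_fence_start = text.find(old_fence)
--         old_fence_end = text.rfind(old_fence)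
--         if (
--             old_fence_start != -1
--             and old_fence_end != -1
--             and old_fence_start != old_fence_end
--         ):
--             text = "".join(
--                 [
--                     text[:old_fence_start],
--                     new_fence,
--                     text[old_fence_start + len(old_fence) : old_fence_end],
--                     new_fence,
--                     text[old_fence_end + len(old_fence) :],
--                 ]
--             )
--     return text
-- ===== SOURCE B (Python) =====
-- def _maybe_expand_outer_code_fence(text):
--     # B: one linear pass finds the longest backtick run; the new fence width is
--     # min(max(4, longest_run + 1), 24) -- no repeated substring-membership scans.
--     if text.count("```") > 2:
--         cur = 0
--         best = 0
--         for ch in text: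
--             if ch == "`":
--                 cur += 1
--                 if cur > best:
--                     best = cur
--             else:
--                 cur = 0
--         new_fence = "`" * min(max(4, best + 1), 24)
--         start = text.find("```")
--         end = text.rfind("```")
--         if start != -1 and end != -1 and start != end:
--             text = text[:start] + new_fence + text[start + 3:end] + new_fence + text[end + 3:]
--     return text
-- ===== Notes on version B (the rewrite author's own statement) =====
-- stated objective: alternative
-- what changed: A's fence-width search (up to 21 repeated substring-membership scans of the whole text for '`'*n, n=4..24) is replaced by a single linear pass that tracks the longest run of consecutive backticks, setting the fence width to min(max(4, longest_run+1), 24); the guard, find/rfind and splice are unchanged.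
import Mathlib
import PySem

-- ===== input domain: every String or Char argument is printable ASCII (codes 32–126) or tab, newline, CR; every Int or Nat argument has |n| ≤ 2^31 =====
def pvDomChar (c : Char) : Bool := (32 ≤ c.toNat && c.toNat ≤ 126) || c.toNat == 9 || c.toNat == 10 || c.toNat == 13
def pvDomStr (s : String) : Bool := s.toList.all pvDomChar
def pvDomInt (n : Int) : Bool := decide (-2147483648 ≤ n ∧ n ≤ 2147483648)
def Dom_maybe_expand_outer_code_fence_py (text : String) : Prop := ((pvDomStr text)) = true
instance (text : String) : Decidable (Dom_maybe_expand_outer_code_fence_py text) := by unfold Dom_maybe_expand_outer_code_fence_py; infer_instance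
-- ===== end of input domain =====

-- B replaces A's up-to-21 repeated substring-membership scans for the fence width by one
-- linear pass maintaining the longest backtick run (objective: alternative algorithm).


-- ===== PORT A =====
-- A's width loop: for n in range(4, 25): new_fence = "`" * n; if new_fence not in text: break
def pvFenceLoopA (s : List Char) : List Int → List Char → List Char
  | [], nf => nf
  | n :: rest, _ =>
    let nf := List.replicate n.toNat '`'
    if PySem.Chars.isIn nf s then pvFenceLoopA s rest nf else nf

def maybe_expand_outer_code_fence_py (text : String) : String :=
  let s := text.toList
  if PySem.Chars.count s ['`', '`', '`'] > 2 then
    let new_fence := pvFenceLoopA s (PySem.List.pyRange 4 25 1) []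
    let old_fence : List Char := ['`', '`', '`']
    let old_fence_start := PySem.Chars.find s old_fence
    let old_fence_end := PySem.Chars.rfind s old_fence
    if old_fence_start ≠ -1 ∧ old_fence_end ≠ -1 ∧ old_fence_start ≠ old_fence_end then
      String.ofList (PySem.Chars.join []
        [PySem.Chars.slice s none (some old_fence_start),
         new_fence,
         PySem.Chars.slice s (some (old_fence_start + 3)) (some old_fence_end),
         new_fence,
         PySem.Chars.slice s (some (old_fence_end + 3)) none])
    else text
  else text

-- ===== PORT B =====
-- B's single pass: cur/best counters over the characters (cur, best ≥ 0, kept as Nat)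
def pvScanRun : List Char → Nat → Nat → Nat
  | [], _, best => best
  | c :: rest, cur, best =>
    if c = '`' then
      let cur' := cur + 1
      pvScanRun rest cur' (if cur' > best then cur' else best)
    else
      pvScanRun rest 0 best

def maybe_expand_outer_code_fence_py_alt (text : String) : String :=
  let s := text.toList
  if PySem.Chars.count s ['`', '`', '`'] > 2 then
    let best := pvScanRun s 0 0
    let new_fence := List.replicate (min (max 4 (best + 1)) 24) '`'
    let start := PySem.Chars.find s ['`', '`', '`']
    let stop := PySem.Chars.rfind s ['`', '`', '`']
    if start ≠ -1 ∧ stop ≠ -1 ∧ start ≠ stop then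
      String.ofList (PySem.Chars.slice s none (some start) ++ new_fence ++
        PySem.Chars.slice s (some (start + 3)) (some stop) ++ new_fence ++
        PySem.Chars.slice s (some (stop + 3)) none)
    else text
  else text

-- ===== PRECONDITION & SPEC =====
def Spec_maybe_expand_outer_code_fence_py (text : String) (out : String) : Prop := out = maybe_expand_outer_code_fence_py_alt text
instance (text : String) (out : String) : Decidable (Spec_maybe_expand_outer_code_fence_py text out) := by unfold Spec_maybe_expand_outer_code_fence_py; infer_instance

-- ===== CLAIM (what is proved, stated in full; the proofs are below) =====
def Claim_equal_maybe_expand_outer_code_fence_py : Prop := ∀ (text : String), Dom_maybe_expand_outer_code_fence_py text → Spec_maybe_expand_outer_code_fence_py text (maybe_expand_outer_code_fence_py text)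

-- ===== LEMMAS AND PROOFS =====

-- length of the leading backtick run
def pvLeadRun : List Char → Nat
  | [] => 0
  | c :: r => if c = '`' then pvLeadRun r + 1 else 0

-- longest backtick run anywhere
def pvMaxRun : List Char → Nat
  | [] => 0
  | c :: r => max (pvLeadRun (c :: r)) (pvMaxRun r)

theorem pvLeadRun_le_maxRun (s : List Char) : pvLeadRun s ≤ pvMaxRun s := by
  cases s with
  | nil => exact Nat.le_refl _
  | cons c r => simp only [pvMaxRun]; exact le_max_left _ _

theorem pvRep_prefix_iff (n : Nat) (t : List Char) :
    List.replicate n '`' <+: t ↔ n ≤ pvLeadRun t := by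
  induction n generalizing t with
  | zero => simp
  | succ n ih =>
    cases t with
    | nil => simp [pvLeadRun, List.replicate_succ]
    | cons d u =>
      simp only [List.replicate_succ, List.cons_prefix_cons, pvLeadRun]
      by_cases hd : d = '`'
      · simp [hd, ih u]
      · simp [hd, Ne.symm hd]

theorem pvMaxRun_iff (n : Nat) (s : List Char) :
    n ≤ pvMaxRun s ↔ ∃ t, t <:+ s ∧ n ≤ pvLeadRun t := by
  induction s with
  | nil =>
    simp only [pvMaxRun, Nat.le_zero]
    constructor
    · rintro rfl; exact ⟨[], List.suffix_rfl, Nat.le_refl _⟩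
    · rintro ⟨t, ht, hn⟩
      have : t = [] := List.suffix_nil.mp ht
      subst this; simpa [pvLeadRun] using hn
  | cons c r ih =>
    simp only [pvMaxRun, le_max_iff, ih]
    constructor
    · rintro (h | ⟨t, ht, hn⟩)
      · exact ⟨c :: r, List.suffix_rfl, h⟩
      · exact ⟨t, ht.trans (List.suffix_cons c r), hn⟩
    · rintro ⟨t, ht, hn⟩
      rcases List.suffix_cons_iff.mp ht with h | ht
      · exact Or.inl (h ▸ hn)
      · exact Or.inr ⟨t, ht, hn⟩

theorem pvIsIn_rep (s : List Char) (n : Nat) :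
    PySem.Chars.isIn (List.replicate n '`') s = decide (n ≤ pvMaxRun s) := by
  rcases h : decide (n ≤ pvMaxRun s) with _ | _
  · have hn : ¬ n ≤ pvMaxRun s := of_decide_eq_false h
    apply (PySem.Chars.isIn_eq_false_iff _ _).mpr
    intro hinf
    rcases List.infix_iff_prefix_suffix.mp hinf with ⟨t, hpre, hsuf⟩
    exact hn ((pvMaxRun_iff n s).mpr ⟨t, hsuf, (pvRep_prefix_iff n t).mp hpre⟩)
  · have hn : n ≤ pvMaxRun s := of_decide_eq_true h
    rcases (pvMaxRun_iff n s).mp hn with ⟨t, hsuf, hle⟩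
    exact (PySem.Chars.isIn_iff_infix _ _).mpr
      (List.infix_iff_prefix_suffix.mpr ⟨t, (pvRep_prefix_iff n t).mpr hle, hsuf⟩)

theorem pvScanRun_spec (s : List Char) :
    ∀ cur best, cur ≤ best →
      pvScanRun s cur best = max best (max (cur + pvLeadRun s) (pvMaxRun s)) := by
  induction s with
  | nil =>
    intro cur best h
    simp only [pvScanRun, pvLeadRun, pvMaxRun]
    omega
  | cons c r ih =>
    intro cur best h
    have h1 := pvLeadRun_le_maxRun r
    by_cases hc : c = '`'
    · subst hc
      rw [show pvScanRun ('`' :: r) cur best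
            = pvScanRun r (cur + 1) (if cur + 1 > best then cur + 1 else best) from by
          simp [pvScanRun]]
      rw [ih (cur + 1) _ (by split <;> omega)]
      simp only [pvLeadRun, pvMaxRun, Nat.max_def]
      split_ifs <;> omega
    · rw [show pvScanRun (c :: r) cur best = pvScanRun r 0 best from by
          simp [pvScanRun, hc]]
      rw [ih 0 best (Nat.zero_le _)]
      simp only [pvLeadRun, pvMaxRun, if_neg hc, Nat.max_def]
      split_ifs <;> omega

theorem pvScanRun_eq_maxRun (s : List Char) : pvScanRun s 0 0 = pvMaxRun s := by
  have h := pvScanRun_spec s 0 0 (Nat.le_refl 0)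
  have h2 := pvLeadRun_le_maxRun s
  omega

-- the countdown list [a, a+1, …, 24] used to run A's width loop by induction
def pvIntsFrom (a : Nat) : List Int := (List.range' a (25 - a)).map (fun k => (k : Int))

theorem pvIntsFrom_cons (a : Nat) (h : a < 25) :
    pvIntsFrom a = (a : Int) :: pvIntsFrom (a + 1) := by
  unfold pvIntsFrom
  rw [show 25 - a = (25 - (a + 1)) + 1 by omega, List.range'_succ]
  simp

theorem pvLoopA_from (s : List Char) :
    ∀ d a nf, 24 - a = d → 4 ≤ a → a ≤ 24 →
      pvFenceLoopA s (pvIntsFrom a) nf =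
        List.replicate (min (max a (pvMaxRun s + 1)) 24) '`' := by
  intro d
  induction d with
  | zero =>
    intro a nf hd _ h24
    have ha : a = 24 := by omega
    subst ha
    rw [pvIntsFrom_cons 24 (by omega),
        show pvIntsFrom 25 = [] from rfl]
    simp only [pvFenceLoopA, pvIsIn_rep, Int.toNat_natCast]
    have := pvMaxRun s
    split <;> exact congrArg (fun k => List.replicate k '`') (by omega)
  | succ d ih =>
    intro a nf hd h4 h24
    have ha : a < 24 := by omega
    rw [pvIntsFrom_cons a (by omega)]
    simp only [pvFenceLoopA, pvIsIn_rep, Int.toNat_natCast]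
    by_cases hm : a ≤ pvMaxRun s
    · rw [if_pos (by simpa using hm)]
      rw [ih (a + 1) _ (by omega) (by omega) (by omega)]
      exact congrArg (fun k => List.replicate k '`') (by omega)
    · rw [if_neg (by simpa using hm)]
      exact congrArg (fun k => List.replicate k '`') (by omega)

theorem pvFenceLoopA_eq (s : List Char) :
    pvFenceLoopA s (PySem.List.pyRange 4 25 1) [] =
      List.replicate (min (max 4 (pvScanRun s 0 0 + 1)) 24) '`' := by
  rw [pvScanRun_eq_maxRun,
      show PySem.List.pyRange 4 25 1 = pvIntsFrom 4 from by decide,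
      pvLoopA_from s 20 4 [] (by omega) (by omega) (by omega)]

-- ===== VERDICT (by name: the statement is the Claim_ definition above) =====
theorem maybe_expand_outer_code_fence_py_spec : Claim_equal_maybe_expand_outer_code_fence_py := by
  intro text _hdom
  unfold Spec_maybe_expand_outer_code_fence_py
  simp only [maybe_expand_outer_code_fence_py, maybe_expand_outer_code_fence_py_alt,
    pvFenceLoopA_eq]
  split
  · split
    · congr 1
      simp [PySem.Chars.join, List.intercalate]
    · rfl
  · rfl
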